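-- pv_equiv track=rewrite | github.com/santiadlv/cmm-compiler | src/parser/cfg.py | create_parsing_table
-- ===== SOURCE A (Python) =====
-- def create_parsing_table(
--
--     terminals: set,
--     non_terminals: set,
--     num_productions: dict,
--     fp_sets: list,
--     production_terminals: list,
--     simple_nt: list,
-- ) -> tuple:
--     """
--     Create a parsing table for the given grammar for use in LL(1) parser.
--
--     Args:
--         terminals (set): Set of terminal symbols.
--         non_terminals (set): Set of non terminal symbols.
--         num_productions (dict): List of numbered productions.
--         fp_sets (list): List of first plus sets.
--         production_terminals (list): List of production terminals.
--         simple_nt (list): List of simplified non terminal symbols.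
--
--     Returns:
--         tuple: Both the parsing table and the ordered terminals.
--     """
--     table = {}
--     ordered_t = sorted(terminals)
--     ordered_t.append("$")
--
--     ordering = {nt: i for i, nt in enumerate(simple_nt)}
--     ordered_nt = sorted(list(non_terminals), key=lambda nt: ordering[nt])
--
--     for nt in ordered_nt:
--         table[nt] = {}
--
--         for terminal in ordered_t:
--             table[nt][terminal] = "ERROR"
--
--     for prod, fp_set, pt in zip(num_productions, fp_sets, production_terminals):
--         for terminal in fp_set:
--             if terminal == "ε":
--                 continue
--             table[pt[0]][terminal] = num_productions[prod]
--
--     return table, ordered_t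
-- ===== SOURCE B (Python) =====
-- def create_parsing_table(
--     terminals: set,
--     non_terminals: set,
--     num_productions: dict,
--     fp_sets: list,
--     production_terminals: list,
--     simple_nt: list,
-- ) -> tuple:
--     ordered_t = sorted(terminals)
--     ordered_t.append("$")
--
--     ordering = {nt: i for i, nt in enumerate(simple_nt)}
--     ordered_nt = sorted(list(non_terminals), key=lambda nt: ordering[nt])
--
--     # Group the productions by their head non-terminal in one pass (skipping
--     # productions whose first-plus set contributes nothing), then build each
--     # row independently by replaying only its own bucket.
--     buckets = {nt: [] for nt in ordered_nt}
--     for prod, fp_set, pt in zip(num_productions, fp_sets, production_terminals):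
--         if any(t != "ε" for t in fp_set):
--             buckets[pt[0]].append((fp_set, num_productions[prod]))
--
--     table = {}
--     for nt in ordered_nt:
--         row = dict.fromkeys(ordered_t, "ERROR")
--         for fp_set, rhs in buckets[nt]:
--             for t in fp_set:
--                 if t != "ε":
--                     row[t] = rhs
--         table[nt] = row
--     return table, ordered_t
-- ===== Notes on version B (the rewrite author's own statement) =====
-- stated objective: alternative
-- what changed: A pre-fills the whole table and then mutates cells across rows in one global pass over the productions; B first groups the productions by their head non-terminal into buckets (one pass), then constructs each row independently by replaying only that row's bucket, so the table is built row by row with no cross-row mutation.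
import Mathlib
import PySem

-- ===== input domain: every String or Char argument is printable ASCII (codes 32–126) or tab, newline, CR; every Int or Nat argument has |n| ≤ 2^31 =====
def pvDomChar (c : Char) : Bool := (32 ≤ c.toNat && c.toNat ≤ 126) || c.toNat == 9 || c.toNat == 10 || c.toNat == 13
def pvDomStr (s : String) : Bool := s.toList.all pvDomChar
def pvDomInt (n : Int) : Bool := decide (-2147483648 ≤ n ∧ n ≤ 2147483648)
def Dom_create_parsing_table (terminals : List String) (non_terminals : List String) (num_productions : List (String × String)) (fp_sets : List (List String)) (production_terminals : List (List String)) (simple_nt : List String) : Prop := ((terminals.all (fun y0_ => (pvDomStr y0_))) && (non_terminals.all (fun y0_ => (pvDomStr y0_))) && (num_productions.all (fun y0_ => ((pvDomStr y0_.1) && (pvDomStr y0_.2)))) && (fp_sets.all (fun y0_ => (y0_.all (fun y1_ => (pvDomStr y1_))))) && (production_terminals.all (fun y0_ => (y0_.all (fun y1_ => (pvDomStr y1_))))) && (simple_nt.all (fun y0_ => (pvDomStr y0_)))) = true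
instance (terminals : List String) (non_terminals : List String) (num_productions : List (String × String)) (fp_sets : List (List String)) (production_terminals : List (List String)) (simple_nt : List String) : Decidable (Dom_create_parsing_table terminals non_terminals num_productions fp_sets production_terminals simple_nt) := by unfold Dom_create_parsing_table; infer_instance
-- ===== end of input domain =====

-- B replaces A's fill-then-globally-mutate construction by a one-pass group-by of the
-- productions into per-non-terminal buckets followed by independent row-by-row replay;
-- same cost, different decomposition.


-- ===== PORT A =====
-- shared argument decoding / prologue (identical lines in both Pythons):
-- ordered_t = sorted(terminals) + ["$"]
def pvOrderedT (terminals : List String) : List String :=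
  PySem.List.sorted terminals (fun x => x) false ++ ["$"]
-- ordering = {nt: i for i, nt in enumerate(simple_nt)}
def pvOrdering (simple_nt : List String) : PySem.Dict String Int :=
  (PySem.List.enumerate simple_nt 0).foldl (fun d p => d.insert p.2 p.1) PySem.Dict.empty
-- ordered_nt = sorted(list(non_terminals), key=lambda nt: ordering[nt])
def pvOrderedNT (non_terminals : List String) (simple_nt : List String) : List String :=
  PySem.List.sorted non_terminals (fun nt => (pvOrdering simple_nt).getD nt 0) false
-- the dict argument num_productions
def pvNp (num_productions : List (String × String)) : PySem.Dict String String :=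
  PySem.Dict.mk num_productions
-- zip(num_productions, fp_sets, production_terminals)
def pvZ (num_productions : List (String × String)) (fp_sets : List (List String)) (production_terminals : List (List String)) : List (String × (List String × List String)) :=
  (pvNp num_productions).keys.zip (fp_sets.zip production_terminals)

-- for nt in ordered_nt: table[nt] = {}; for terminal in ordered_t: table[nt][terminal] = "ERROR"
def pvInit (ordered_nt ordered_t : List String) : PySem.Dict String (PySem.Dict String String) :=
  ordered_nt.foldl (fun tab nt =>
    tab.insert nt (ordered_t.foldl (fun r t => r.insert t "ERROR") PySem.Dict.empty)) PySem.Dict.empty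

def create_parsing_table (terminals : List String) (non_terminals : List String) (num_productions : List (String × String)) (fp_sets : List (List String)) (production_terminals : List (List String)) (simple_nt : List String) : (List (String × List (String × String))) × List String :=
  -- table = pvInit …; then: for prod, fp_set, pt in zip(...): for terminal in fp_set:
  --   if terminal == "ε": continue
  --   table[pt[0]][terminal] = num_productions[prod]
  (((pvZ num_productions fp_sets production_terminals).foldl (fun tab x =>
      x.2.1.foldl (fun tab t =>
        if t = "ε" then tab
        else tab.modify (PySem.List.pyGetD x.2.2 0 "") PySem.Dict.empty
               (fun r => r.insert t (((pvNp num_productions).get? x.1).getD ""))) tab)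
      (pvInit (pvOrderedNT non_terminals simple_nt) (pvOrderedT terminals))).items.map
        (fun p => (p.1, p.2.items)),
   pvOrderedT terminals)

-- ===== PORT B =====
-- buckets = {nt: [] for nt in ordered_nt}; then one pass over zip(...):
--   if any(t != "ε" for t in fp_set): buckets[pt[0]].append((fp_set, num_productions[prod]))
def pvBuckets (ordered_nt : List String) (num_productions : List (String × String)) (fp_sets : List (List String)) (production_terminals : List (List String)) : PySem.Dict String (List (List String × String)) :=
  (pvZ num_productions fp_sets production_terminals).foldl (fun d x =>
    if x.2.1.any (fun t => t != "ε") then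
      d.modify (PySem.List.pyGetD x.2.2 0 "") []
        (fun l => l ++ [(x.2.1, ((pvNp num_productions).get? x.1).getD "")])
    else d)
    (ordered_nt.foldl (fun d nt => d.insert nt []) PySem.Dict.empty)

-- row = dict.fromkeys(ordered_t, "ERROR")
def pvRow0 (ordered_t : List String) : PySem.Dict String String :=
  ordered_t.foldl (fun r t => r.insert t "ERROR") PySem.Dict.empty

-- for fp_set, rhs in bucket: for t in fp_set: if t != "ε": row[t] = rhs
def pvReplay (b : List (List String × String)) (r : PySem.Dict String String) : PySem.Dict String String :=
  b.foldl (fun r p => p.1.foldl (fun r t => if t != "ε" then r.insert t p.2 else r) r) r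

def create_parsing_table_alt (terminals : List String) (non_terminals : List String) (num_productions : List (String × String)) (fp_sets : List (List String)) (production_terminals : List (List String)) (simple_nt : List String) : (List (String × List (String × String))) × List String :=
  -- table = {}; for nt in ordered_nt: table[nt] = replay of buckets[nt] over the default row
  (((pvOrderedNT non_terminals simple_nt).foldl (fun tab nt =>
      tab.insert nt
        (pvReplay ((pvBuckets (pvOrderedNT non_terminals simple_nt) num_productions fp_sets production_terminals).getD nt [])
          (pvRow0 (pvOrderedT terminals))))
      (PySem.Dict.empty : PySem.Dict String (PySem.Dict String String))).items.map
        (fun p => (p.1, p.2.items)),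
   pvOrderedT terminals)

-- ===== PRECONDITION & SPEC =====
-- Pre_ requires the set/dict arguments to be genuine (no duplicate elements / keys, as
-- Python's set and dict guarantee) and excludes exactly the inputs where A raises: a
-- non-terminal missing from simple_nt (KeyError in the sort key), and a production whose
-- first-plus set contains a non-ε symbol while production_terminals is empty or its head is
-- not a table row (IndexError / KeyError on table[pt[0]]).
def Pre_create_parsing_table (terminals : List String) (non_terminals : List String) (num_productions : List (String × String)) (fp_sets : List (List String)) (production_terminals : List (List String)) (simple_nt : List String) : Prop :=
  terminals.Nodup ∧ non_terminals.Nodup ∧ (num_productions.map (·.1)).Nodup ∧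
  (∀ nt ∈ non_terminals, nt ∈ simple_nt) ∧
  (∀ x ∈ num_productions.zip (fp_sets.zip production_terminals), (∃ t ∈ x.2.1, t ≠ "ε") →
     x.2.2 ≠ [] ∧ x.2.2.headD "" ∈ non_terminals)
instance (terminals : List String) (non_terminals : List String) (num_productions : List (String × String)) (fp_sets : List (List String)) (production_terminals : List (List String)) (simple_nt : List String) : Decidable (Pre_create_parsing_table terminals non_terminals num_productions fp_sets production_terminals simple_nt) := by unfold Pre_create_parsing_table; infer_instance

def pvWitness_create_parsing_table : List String × List String × (List (String × String)) × List (List String) × List (List String) × List String :=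
  (["a"], ["S"], [("1", "S->a")], [["a"]], [["S"]], ["S"])

def Spec_create_parsing_table (terminals : List String) (non_terminals : List String) (num_productions : List (String × String)) (fp_sets : List (List String)) (production_terminals : List (List String)) (simple_nt : List String) (out : (List (String × List (String × String))) × List String) : Prop := out = create_parsing_table_alt terminals non_terminals num_productions fp_sets production_terminals simple_nt
instance (terminals : List String) (non_terminals : List String) (num_productions : List (String × String)) (fp_sets : List (List String)) (production_terminals : List (List String)) (simple_nt : List String) (out : (List (String × List (String × String))) × List String) : Decidable (Spec_create_parsing_table terminals non_terminals num_productions fp_sets production_terminals simple_nt out) := by unfold Spec_create_parsing_table; infer_instance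

-- ===== CLAIM (what is proved, stated in full; the proofs are below) =====
def Claim_equal_create_parsing_table : Prop := ∀ (terminals : List String) (non_terminals : List String) (num_productions : List (String × String)) (fp_sets : List (List String)) (production_terminals : List (List String)) (simple_nt : List String), Dom_create_parsing_table terminals non_terminals num_productions fp_sets production_terminals simple_nt → Pre_create_parsing_table terminals non_terminals num_productions fp_sets production_terminals simple_nt → Spec_create_parsing_table terminals non_terminals num_productions fp_sets production_terminals simple_nt (create_parsing_table terminals non_terminals num_productions fp_sets production_terminals simple_nt)

-- ===== LEMMAS AND PROOFS =====

-- a dict over the distinct keys ks whose value at k is g k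
def pvTab {ν : Type} (ks : List String) (g : String → ν) : PySem.Dict String ν :=
  ks.foldl (fun T k => T.insert k (g k)) PySem.Dict.empty

lemma pvTab_items {ν : Type} (ks : List String) (g : String → ν) (hnd : ks.Nodup) :
    (pvTab ks g).items = ks.map (fun k => (k, g k)) := by
  simpa [pvTab] using
    PySem.Dict.items_foldl_insert_fresh ks (fun k => k) g PySem.Dict.empty
      (fun _ _ => rfl) (by simpa using hnd)

lemma pvTab_keys {ν : Type} (ks : List String) (g : String → ν) (hnd : ks.Nodup) :
    (pvTab ks g).keys = ks := by
  rw [PySem.Dict.keys, pvTab_items ks g hnd, List.map_map]; simp [Function.comp_def]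

lemma pvTab_getD {ν : Type} (ks : List String) (g : String → ν) (hnd : ks.Nodup)
    (k : String) (hk : k ∈ ks) (d : ν) : (pvTab ks g).getD k d = g k := by
  apply PySem.Dict.getD_of_mem_items
  · rw [pvTab_items ks g hnd]; exact List.mem_map_of_mem hk
  · rw [pvTab_keys ks g hnd]; exact hnd

lemma pvTab_congr {ν : Type} (ks : List String) (g g' : String → ν) (hnd : ks.Nodup)
    (h : ∀ k ∈ ks, g k = g' k) : pvTab ks g = pvTab ks g' := by
  apply PySem.Dict.ext
  rw [pvTab_items ks g hnd, pvTab_items ks g' hnd]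
  exact List.map_congr_left (fun k hk => by rw [h k hk])

lemma pvTab_modify {ν : Type} (ks : List String) (g : String → ν) (hnd : ks.Nodup)
    (k0 : String) (hk : k0 ∈ ks) (dflt : ν) (f : ν → ν) :
    (pvTab ks g).modify k0 dflt f = pvTab ks (fun k => if k = k0 then f (g k) else g k) := by
  apply PySem.Dict.ext
  have hc : (pvTab ks g).contains k0 = true := by
    rw [PySem.Dict.contains_iff_mem_keys, pvTab_keys ks g hnd]; exact hk
  rw [PySem.Dict.modify, PySem.Dict.items_insert_of_contains _ _ hc,
      pvTab_getD ks g hnd k0 hk dflt, pvTab_items ks g hnd,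
      pvTab_items ks _ hnd, List.map_map]
  refine List.map_congr_left (fun k _ => ?_)
  by_cases hke : k = k0 <;> simp [hke]

-- applying a list of keyed row updates by dict-modify = updating the row function pointwise
lemma pvTab_foldl {ν : Type} (ks : List String) (hnd : ks.Nodup) (dflt : ν)
    (upds : List (String × (ν → ν))) (hin : ∀ u ∈ upds, u.1 ∈ ks) :
    ∀ g, upds.foldl (fun T u => T.modify u.1 dflt u.2) (pvTab ks g)
      = pvTab ks (fun k => (upds.filter (fun u => u.1 = k)).foldl (fun r u => u.2 r) (g k)) := by
  induction upds with
  | nil => intro g; simp [pvTab]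
  | cons u upds ih =>
      intro g
      have hu := hin u (List.mem_cons_self ..)
      simp only [List.foldl_cons]
      rw [pvTab_modify ks g hnd u.1 hu dflt u.2,
          ih (fun w hw => hin w (List.mem_cons_of_mem _ hw))]
      refine pvTab_congr ks _ _ hnd (fun k _ => ?_)
      by_cases hk : u.1 = k
      · simp [hk]
      · simp [hk, Ne.symm hk]

-- nested production/terminal loop = fold over the flattened (skip-filtered) update list
lemma pvFoldl_nested {α σ τ β : Type} (z : List α) (g : α → List σ) (p : σ → Bool)
    (h : α → σ → τ) (f : β → τ → β) (b0 : β) :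
    z.foldl (fun b x => (g x).foldl (fun b t => if p t then b else f b (h x t)) b) b0
      = (z.flatMap (fun x => ((g x).filter (fun t => !(p t))).map (h x))).foldl f b0 := by
  induction z generalizing b0 with
  | nil => rfl
  | cons x z ih =>
      simp only [List.foldl_cons, List.flatMap_cons, List.foldl_append,
        List.foldl_map, List.foldl_filter]
      rw [show (fun (b : β) t => if (!(p t)) = true then f b (h x t) else b)
            = (fun (b : β) t => if p t then b else f b (h x t)) from
          funext fun b => funext fun t => by by_cases hp : p t <;> simp [hp]]
      exact ih _

-- per-non-terminal view: A's flattened updates filtered to one key = B's bucket replay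
lemma pvPerKey {X : Type} (z : List X) (head : X → String) (fps : X → List String)
    (v : X → String) (nt : String) :
    ∀ r0 : PySem.Dict String String,
    ((z.flatMap (fun x => ((fps x).filter (fun t => !(decide (t = "ε")))).map
        (fun t => (head x, fun r : PySem.Dict String String => r.insert t (v x))))).filter
        (fun u => u.1 = nt)).foldl (fun r u => u.2 r) r0
      = (((z.filter (fun x => (fps x).any (fun t => t != "ε"))).filter
          (fun x => head x == nt)).map (fun x => (fps x, v x))).foldl
          (fun r p => p.1.foldl (fun r t => if t != "ε" then r.insert t p.2 else r) r) r0 := by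
  induction z with
  | nil => intro r0; rfl
  | cons x z ih =>
      intro r0
      have hq : (((fps x).filter (fun t => !(decide (t = "ε")))).map
          (fun t => (head x, fun r : PySem.Dict String String => r.insert t (v x)))).filter
          (fun u => decide (u.1 = nt))
          = if head x = nt then ((fps x).filter (fun t => !(decide (t = "ε")))).map
              (fun t => (head x, fun r : PySem.Dict String String => r.insert t (v x)))
            else [] := by
        rw [List.filter_map]
        by_cases hh : head x = nt
        · simp [Function.comp_def, hh]
        · simp [Function.comp_def, hh]
      simp only [List.flatMap_cons, List.filter_append, List.foldl_append]
      rw [hq]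
      by_cases hany : ((fps x).any (fun t => t != "ε")) = true
      · rw [List.filter_cons_of_pos (l := z) hany]
        by_cases hh : head x = nt
        · rw [if_pos hh, List.filter_cons_of_pos (l := z.filter (fun x => (fps x).any (fun t => t != "ε"))) (by simpa using hh), List.map_cons,
              List.foldl_cons, ih]
          congr 1
          rw [List.foldl_map, List.foldl_filter]
          apply PySem.List.foldl_congr_mem
          intro r t _
          by_cases ht : t = "ε" <;> simp [ht]
        · rw [if_neg hh, List.filter_cons_of_neg (l := z.filter (fun x => (fps x).any (fun t => t != "ε"))) (by simpa using hh), List.foldl_nil]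
          exact ih r0
      · have hh' : ∀ t ∈ fps x, t = "ε" := by
          intro t ht
          by_contra hc
          exact hany (List.any_eq_true.2 ⟨t, ht, by simpa using hc⟩)
        have hnilf : (fps x).filter (fun t => !(decide (t = "ε"))) = [] :=
          List.filter_eq_nil_iff.2 (fun t ht => by simp [hh' t ht])
        rw [List.filter_cons_of_neg (l := z) (by simpa using hany), hnilf]
        simp only [List.map_nil]
        split <;> exact ih r0

-- ===== VERDICT (by name: the statement is the Claim_ definition above) =====
theorem create_parsing_table_spec : Claim_equal_create_parsing_table := by
  intro terminals non_terminals num_productions fp_sets production_terminals simple_nt _ hpre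
  obtain ⟨hT, hNT, hNP, hsub, hz⟩ := hpre
  unfold Spec_create_parsing_table create_parsing_table create_parsing_table_alt
  have hndnt : (pvOrderedNT non_terminals simple_nt).Nodup :=
    ((PySem.List.sorted_perm non_terminals _ false).nodup_iff).2 hNT
  have hzk : pvZ num_productions fp_sets production_terminals
      = (num_productions.zip (fp_sets.zip production_terminals)).map (Prod.map (·.1) id) := by
    unfold pvZ pvNp; rw [PySem.Dict.keys_mk, List.zip_map_left]
  -- every production that writes anything has its head among the table rows
  have hkey : ∀ x ∈ pvZ num_productions fp_sets production_terminals, (∃ t ∈ x.2.1, t ≠ "ε") →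
      PySem.List.pyGetD x.2.2 0 "" ∈ pvOrderedNT non_terminals simple_nt := by
    intro x hx ht
    rw [hzk] at hx
    obtain ⟨y, hy, rfl⟩ := List.mem_map.1 hx
    obtain ⟨hne, hmem⟩ := hz y hy (by simpa using ht)
    have hhead : PySem.List.pyGetD ((Prod.map (·.1) id y).2.2) 0 "" = y.2.2.headD "" := by
      cases hc : y.2.2 with
      | nil => exact absurd hc hne
      | cons a l => simp [Prod.map, hc, PySem.List.pyGetD, PySem.List.pyGet?, PySem.List.pyIdx?]
    rw [hhead]
    unfold pvOrderedNT
    rw [PySem.List.mem_sorted]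
    exact hmem
  -- the flattened A update list (pt[0], row ↦ row with cell written) in write order
  set upds : List (String × (PySem.Dict String String → PySem.Dict String String)) :=
    (pvZ num_productions fp_sets production_terminals).flatMap (fun x =>
      (x.2.1.filter (fun t => !(decide (t = "ε")))).map (fun t =>
        (PySem.List.pyGetD x.2.2 0 "",
         fun r : PySem.Dict String String => r.insert t (((pvNp num_productions).get? x.1).getD "")))) with hupdsdef
  have hupds : ∀ u ∈ upds, u.1 ∈ pvOrderedNT non_terminals simple_nt := by
    intro u hu
    rw [hupdsdef] at hu
    simp only [List.mem_flatMap, List.mem_map, List.mem_filter] at hu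
    obtain ⟨x, hx, t, ⟨htmem, hne⟩, rfl⟩ := hu
    exact hkey x hx ⟨t, htmem, by simpa using hne⟩
  -- A's nested mutation loop, flattened
  have hA := pvFoldl_nested (pvZ num_productions fp_sets production_terminals)
      (fun x => x.2.1) (fun t => decide (t = "ε"))
      (fun x t => (PySem.List.pyGetD x.2.2 0 "",
        fun r : PySem.Dict String String => r.insert t (((pvNp num_productions).get? x.1).getD "")))
      (fun (tab : PySem.Dict String (PySem.Dict String String)) u =>
        tab.modify u.1 PySem.Dict.empty u.2)
      (pvInit (pvOrderedNT non_terminals simple_nt) (pvOrderedT terminals))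
  simp only [decide_eq_true_eq] at hA
  have hinit : pvInit (pvOrderedNT non_terminals simple_nt) (pvOrderedT terminals)
      = pvTab (pvOrderedNT non_terminals simple_nt) (fun _ => pvRow0 (pvOrderedT terminals)) := rfl
  rw [hinit] at hA
  rw [pvTab_foldl _ hndnt PySem.Dict.empty upds hupds] at hA
  rw [hinit, hA]
  -- B's outer loop is the same table-of-rows shape
  have hBtab : ((pvOrderedNT non_terminals simple_nt).foldl (fun tab nt =>
      tab.insert nt
        (pvReplay ((pvBuckets (pvOrderedNT non_terminals simple_nt) num_productions fp_sets production_terminals).getD nt [])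
          (pvRow0 (pvOrderedT terminals))))
      (PySem.Dict.empty : PySem.Dict String (PySem.Dict String String)))
      = pvTab (pvOrderedNT non_terminals simple_nt) (fun nt =>
          pvReplay ((pvBuckets (pvOrderedNT non_terminals simple_nt) num_productions fp_sets production_terminals).getD nt [])
            (pvRow0 (pvOrderedT terminals))) := rfl
  rw [hBtab]
  -- bucket contents at a table row nt
  have hbget : ∀ nt ∈ pvOrderedNT non_terminals simple_nt,
      (pvBuckets (pvOrderedNT non_terminals simple_nt) num_productions fp_sets production_terminals).getD nt []
      = (((pvZ num_productions fp_sets production_terminals).filter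
            (fun x => x.2.1.any (fun t => t != "ε"))).filter
            (fun x => PySem.List.pyGetD x.2.2 0 "" == nt)).map
            (fun x => (x.2.1, ((pvNp num_productions).get? x.1).getD "")) := by
    intro nt hnt
    unfold pvBuckets
    rw [PySem.List.foldl_if_eq_foldl_filter]
    rw [show (((pvZ num_productions fp_sets production_terminals).filter
          (fun x => x.2.1.any (fun t => t != "ε"))).foldl (fun d x =>
            d.modify (PySem.List.pyGetD x.2.2 0 "") []
              (fun l => l ++ [(x.2.1, ((pvNp num_productions).get? x.1).getD "")]))
            ((pvOrderedNT non_terminals simple_nt).foldl (fun d nt => d.insert nt [])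
              (PySem.Dict.empty : PySem.Dict String (List (List String × String)))))
        = ((((pvZ num_productions fp_sets production_terminals).filter
          (fun x => x.2.1.any (fun t => t != "ε"))).map (fun x =>
            (PySem.List.pyGetD x.2.2 0 "", (x.2.1, ((pvNp num_productions).get? x.1).getD "")))).foldl
            (fun d q => d.modify q.1 [] (fun l => l ++ [q.2]))
            ((pvOrderedNT non_terminals simple_nt).foldl (fun d nt => d.insert nt [])
              (PySem.Dict.empty : PySem.Dict String (List (List String × String))))) from by rw [List.foldl_map]]
    rw [PySem.Dict.getD_foldl_modify_append]
    have hstart : ((pvOrderedNT non_terminals simple_nt).foldl (fun d nt => d.insert nt [])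
        (PySem.Dict.empty : PySem.Dict String (List (List String × String))))
        = pvTab (pvOrderedNT non_terminals simple_nt) (fun _ => []) := rfl
    rw [hstart, pvTab_getD _ _ hndnt nt hnt, List.filter_map, List.map_map]
    simp only [List.nil_append, Function.comp_def]
  refine congrArg (fun tab : PySem.Dict String (PySem.Dict String String) => (tab.items.map (fun p => (p.1, p.2.items)), pvOrderedT terminals)) ?_
  refine pvTab_congr _ _ _ hndnt (fun nt hnt => ?_)
  rw [hbget nt hnt, hupdsdef]
  unfold pvReplay
  rw [List.foldl_map]
  exact (pvPerKey (pvZ num_productions fp_sets production_terminals)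
    (fun x => PySem.List.pyGetD x.2.2 0 "") (fun x => x.2.1)
    (fun x => ((pvNp num_productions).get? x.1).getD "") nt (pvRow0 (pvOrderedT terminals))).trans
    (by rw [List.foldl_map])
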